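-- pv_equiv track=rewrite | github.com/JuliusMutugu/llm_kikuyu_english_swahili_and_luo_multilanguge | enhanced_api_server.py | get_cultural_response
-- ===== SOURCE A (Python) =====
-- from typing import Optional, Dict, Any
--
-- def get_cultural_response(message: str, detected_lang: str) -> Optional[str]:
--     """Get culturally appropriate response based on message"""
--     message_lower = message.lower()
--
--     # Greeting responses
--     if any(word in message_lower for word in ['hello', 'hi', 'habari', 'hujambo', 'atia', 'nadi']):
--         responses = {
--             'english': "Hello! How are you doing today?",
--             'swahili': "Habari yako! Hujambo?",
--             'kikuyu': "Wĩ atĩa? Ũrĩ nĩarĩa?",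
--             'luo': "Inadi? To idhi nadi?"
--         }
--         return responses.get(detected_lang, responses['english'])
--
--     # Love expressions
--     if any(word in message_lower for word in ['love', 'nakupenda', 'kenda', 'aheri']):
--         responses = {
--             'english': "That's beautiful! Love is wonderful.",
--             'swahili': "Hilo ni zuri sana! Upendo ni kitu kizuri.",
--             'kikuyu': "Nĩ gũkena kũega! Wendani nĩ kĩega.",
--             'luo': "Mano ber ahinya! Hera en gima ber."
--         }
--         return responses.get(detected_lang, responses['english'])
--
--     # Thanks responses
--     if any(word in message_lower for word in ['thank', 'asante', 'ngaatho', 'erokamano']):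
--         responses = {
--             'english': "You're very welcome! Happy to help.",
--             'swahili': "Karibu sana! Nifurahi kukusaidia.",
--             'kikuyu': "Ũrĩ mũgeni! Nĩngenete gũkũteithia.",
--             'luo': "Kwa kamano! Amor ka konyou."
--         }
--         return responses.get(detected_lang, responses['english'])
--
--     # Family questions
--     if any(word in message_lower for word in ['family', 'familia', 'nyumba', 'joodu']):
--         responses = {
--             'english': "Family is very important. How is your family?",
--             'swahili': "Familia ni muhimu sana. Familia yako hali gani?",
--             'kikuyu': "Nyũmba nĩ kĩene mũno. Nyũmba yaku ĩrĩ atĩa?",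
--             'luo': "Joodu en gima maduong'. Joodu to nade?"
--         }
--         return responses.get(detected_lang, responses['english'])
--
--     return None
-- ===== SOURCE B (Python) =====
-- from typing import Optional, Dict, Any
--
-- # Inverted index: each keyword maps to the index of its rule (group).
-- KEYWORD_RULE: Dict[str, int] = {
--     'hello': 0, 'hi': 0, 'habari': 0, 'hujambo': 0, 'atia': 0, 'nadi': 0,
--     'love': 1, 'nakupenda': 1, 'kenda': 1, 'aheri': 1,
--     'thank': 2, 'asante': 2, 'ngaatho': 2, 'erokamano': 2,
--     'family': 3, 'familia': 3, 'nyumba': 3, 'joodu': 3,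
-- }
--
-- RESPONSES = [
--     {
--         'english': "Hello! How are you doing today?",
--         'swahili': "Habari yako! Hujambo?",
--         'kikuyu': "Wĩ atĩa? Ũrĩ nĩarĩa?",
--         'luo': "Inadi? To idhi nadi?"
--     },
--     {
--         'english': "That's beautiful! Love is wonderful.",
--         'swahili': "Hilo ni zuri sana! Upendo ni kitu kizuri.",
--         'kikuyu': "Nĩ gũkena kũega! Wendani nĩ kĩega.",
--         'luo': "Mano ber ahinya! Hera en gima ber."
--     },
--     {
--         'english': "You're very welcome! Happy to help.",
--         'swahili': "Karibu sana! Nifurahi kukusaidia.",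
--         'kikuyu': "Ũrĩ mũgeni! Nĩngenete gũkũteithia.",
--         'luo': "Kwa kamano! Amor ka konyou."
--     },
--     {
--         'english': "Family is very important. How is your family?",
--         'swahili': "Familia ni muhimu sana. Familia yako hali gani?",
--         'kikuyu': "Nyũmba nĩ kĩene mũno. Nyũmba yaku ĩrĩ atĩa?",
--         'luo': "Joodu en gima maduong'. Joodu to nade?"
--     },
-- ]
--
-- def get_cultural_response(message: str, detected_lang: str) -> Optional[str]:
--     """Keyword-major search: collect the rule index of every keyword that
--     occurs in the message, and answer with the minimal (= earliest) rule.
--     Correct because A's rule-by-rule first match is exactly the rule of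
--     minimal index that has some matching keyword."""
--     message_lower = message.lower()
--     hits = [idx for word, idx in KEYWORD_RULE.items() if word in message_lower]
--     if not hits:
--         return None
--     responses = RESPONSES[min(hits)]
--     return responses.get(detected_lang, responses['english'])
-- ===== Notes on version B (the rewrite author's own statement) =====
-- stated objective: alternative
-- what changed: B inverts the search: instead of testing the four rules in order and returning at the first hit, it uses a keyword->rule-index inverted index, collects the indices of ALL keywords occurring in the message in one pass, and answers with the rule of minimal index (proved equal to A's first-match), with the responses held in a list indexed by rule.
import Mathlib
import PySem

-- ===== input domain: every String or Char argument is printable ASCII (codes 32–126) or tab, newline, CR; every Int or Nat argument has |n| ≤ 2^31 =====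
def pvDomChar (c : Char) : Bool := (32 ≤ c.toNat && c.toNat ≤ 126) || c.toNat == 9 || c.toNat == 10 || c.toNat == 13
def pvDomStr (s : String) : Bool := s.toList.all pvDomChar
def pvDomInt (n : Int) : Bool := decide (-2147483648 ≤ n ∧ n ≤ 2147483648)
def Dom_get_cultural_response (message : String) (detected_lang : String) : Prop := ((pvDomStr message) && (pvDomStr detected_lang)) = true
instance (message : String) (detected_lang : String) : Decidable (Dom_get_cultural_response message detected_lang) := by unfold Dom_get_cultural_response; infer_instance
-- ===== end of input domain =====

-- B inverts the search: a keyword->rule-index map, collect ALL matching rule indices in one pass, answer with the minimal index (alternative decomposition; proved equal to A's rule-by-rule first match).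


-- ===== PORT A =====
def get_cultural_response (message : String) (detected_lang : String) : Option String :=
  let message_lower := PySem.Str.lower message
  if ["hello", "hi", "habari", "hujambo", "atia", "nadi"].any (fun w => PySem.Str.isIn w message_lower) then
    let responses : PySem.Dict String String := PySem.Dict.ofList
      [("english", "Hello! How are you doing today?"),
       ("swahili", "Habari yako! Hujambo?"),
       ("kikuyu", "Wĩ atĩa? Ũrĩ nĩarĩa?"),
       ("luo", "Inadi? To idhi nadi?")]
    some (responses.getD detected_lang (responses.getD "english" ""))
  else if ["love", "nakupenda", "kenda", "aheri"].any (fun w => PySem.Str.isIn w message_lower) then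
    let responses : PySem.Dict String String := PySem.Dict.ofList
      [("english", "That's beautiful! Love is wonderful."),
       ("swahili", "Hilo ni zuri sana! Upendo ni kitu kizuri."),
       ("kikuyu", "Nĩ gũkena kũega! Wendani nĩ kĩega."),
       ("luo", "Mano ber ahinya! Hera en gima ber.")]
    some (responses.getD detected_lang (responses.getD "english" ""))
  else if ["thank", "asante", "ngaatho", "erokamano"].any (fun w => PySem.Str.isIn w message_lower) then
    let responses : PySem.Dict String String := PySem.Dict.ofList
      [("english", "You're very welcome! Happy to help."),
       ("swahili", "Karibu sana! Nifurahi kukusaidia."),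
       ("kikuyu", "Ũrĩ mũgeni! Nĩngenete gũkũteithia."),
       ("luo", "Kwa kamano! Amor ka konyou.")]
    some (responses.getD detected_lang (responses.getD "english" ""))
  else if ["family", "familia", "nyumba", "joodu"].any (fun w => PySem.Str.isIn w message_lower) then
    let responses : PySem.Dict String String := PySem.Dict.ofList
      [("english", "Family is very important. How is your family?"),
       ("swahili", "Familia ni muhimu sana. Familia yako hali gani?"),
       ("kikuyu", "Nyũmba nĩ kĩene mũno. Nyũmba yaku ĩrĩ atĩa?"),
       ("luo", "Joodu en gima maduong'. Joodu to nade?")]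
    some (responses.getD detected_lang (responses.getD "english" ""))
  else
    none

-- ===== PORT B =====
-- B: inverted index keyword -> rule index; collect every matching index; answer with the minimal one.
def pvKeywordRule : PySem.Dict String Nat := PySem.Dict.ofList
  [("hello", 0), ("hi", 0), ("habari", 0), ("hujambo", 0), ("atia", 0), ("nadi", 0),
   ("love", 1), ("nakupenda", 1), ("kenda", 1), ("aheri", 1),
   ("thank", 2), ("asante", 2), ("ngaatho", 2), ("erokamano", 2),
   ("family", 3), ("familia", 3), ("nyumba", 3), ("joodu", 3)]

def pvResponses : List (PySem.Dict String String) :=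
  [PySem.Dict.ofList
      [("english", "Hello! How are you doing today?"),
       ("swahili", "Habari yako! Hujambo?"),
       ("kikuyu", "Wĩ atĩa? Ũrĩ nĩarĩa?"),
       ("luo", "Inadi? To idhi nadi?")],
   PySem.Dict.ofList
      [("english", "That's beautiful! Love is wonderful."),
       ("swahili", "Hilo ni zuri sana! Upendo ni kitu kizuri."),
       ("kikuyu", "Nĩ gũkena kũega! Wendani nĩ kĩega."),
       ("luo", "Mano ber ahinya! Hera en gima ber.")],
   PySem.Dict.ofList
      [("english", "You're very welcome! Happy to help."),
       ("swahili", "Karibu sana! Nifurahi kukusaidia."),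
       ("kikuyu", "Ũrĩ mũgeni! Nĩngenete gũkũteithia."),
       ("luo", "Kwa kamano! Amor ka konyou.")],
   PySem.Dict.ofList
      [("english", "Family is very important. How is your family?"),
       ("swahili", "Familia ni muhimu sana. Familia yako hali gani?"),
       ("kikuyu", "Nyũmba nĩ kĩene mũno. Nyũmba yaku ĩrĩ atĩa?"),
       ("luo", "Joodu en gima maduong'. Joodu to nade?")]]

def get_cultural_response_alt (message : String) (detected_lang : String) : Option String :=
  let message_lower := PySem.Str.lower message
  let hits : List Nat := pvKeywordRule.items.filterMap
    (fun p => if PySem.Str.isIn p.1 message_lower then some p.2 else none)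
  match PySem.List.min? hits (fun x => x) with
  | none => none
  | some i =>
    -- RESPONSES[min(hits)]: the index is always 0..3, so the default dict is never used
    let responses := pvResponses.getD i (PySem.Dict.ofList [])
    some (responses.getD detected_lang (responses.getD "english" ""))

-- ===== PRECONDITION & SPEC =====
def Spec_get_cultural_response (message : String) (detected_lang : String) (out : Option String) : Prop := out = get_cultural_response_alt message detected_lang
instance (message : String) (detected_lang : String) (out : Option String) : Decidable (Spec_get_cultural_response message detected_lang out) := by unfold Spec_get_cultural_response; infer_instance

-- ===== CLAIM =====
def Claim_equal_get_cultural_response : Prop := ∀ (message : String) (detected_lang : String), Dom_get_cultural_response message detected_lang → Spec_get_cultural_response message detected_lang (get_cultural_response message detected_lang)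

-- ===== LEMMAS AND PROOFS =====

-- A filterMap that maps every passing element to the same constant is a replicate of the count.
theorem pvFilterMap_const (g : List String) (k : Nat) (c : String → Bool) :
    g.filterMap (fun w => if c w then some k else none) = List.replicate (g.countP c) k := by
  induction g with
  | nil => rfl
  | cons a t ih =>
    by_cases h : c a = true <;>
      simp [h, ih, List.replicate_succ]

-- If k is a member and a lower bound, Python's min returns k.
theorem pvMin?_nat_eq {l : List Nat} {k : Nat} (hmem : k ∈ l) (hlb : ∀ x ∈ l, k ≤ x) :
    PySem.List.min? l (fun x => x) = some k := by
  cases hmin : PySem.List.min? l (fun x => x) with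
  | none =>
    rw [PySem.List.min?_eq_none_iff] at hmin
    subst hmin; cases hmem
  | some m =>
    have h1 : m ≤ k := PySem.List.min?_isMin hmin k hmem
    have h2 : k ≤ m := hlb m (PySem.List.min?_mem hmin)
    have : m = k := Nat.le_antisymm h1 h2
    rw [this]

-- Characterisation of B's "minimal matching rule index" as A's first-match if-chain.
theorem pvMinHits (ml : String) :
    PySem.List.min?
      (pvKeywordRule.items.filterMap
        (fun p => if PySem.Str.isIn p.1 ml then some p.2 else none)) (fun x => x) =
    (if ["hello", "hi", "habari", "hujambo", "atia", "nadi"].any (fun w => PySem.Str.isIn w ml) then some 0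
     else if ["love", "nakupenda", "kenda", "aheri"].any (fun w => PySem.Str.isIn w ml) then some 1
     else if ["thank", "asante", "ngaatho", "erokamano"].any (fun w => PySem.Str.isIn w ml) then some 2
     else if ["family", "familia", "nyumba", "joodu"].any (fun w => PySem.Str.isIn w ml) then some 3
     else none) := by
  have hdecomp : pvKeywordRule.items =
      (["hello", "hi", "habari", "hujambo", "atia", "nadi"].map (fun w => (w, (0 : Nat)))) ++
      (["love", "nakupenda", "kenda", "aheri"].map (fun w => (w, (1 : Nat)))) ++
      (["thank", "asante", "ngaatho", "erokamano"].map (fun w => (w, (2 : Nat)))) ++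
      (["family", "familia", "nyumba", "joodu"].map (fun w => (w, (3 : Nat)))) := by rfl
  rw [hdecomp]
  simp only [List.filterMap_append, List.filterMap_map, Function.comp_def,
    pvFilterMap_const]
  set c : String → Bool := fun w => PySem.Str.isIn w ml with hc
  set n1 := (["hello", "hi", "habari", "hujambo", "atia", "nadi"]).countP c with hn1
  set n2 := (["love", "nakupenda", "kenda", "aheri"]).countP c with hn2
  set n3 := (["thank", "asante", "ngaatho", "erokamano"]).countP c with hn3
  set n4 := (["family", "familia", "nyumba", "joodu"]).countP c with hn4
  have hb : ∀ (g : List String), g.any c = true ↔ g.countP c ≠ 0 := by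
    intro g
    constructor
    · intro h h0
      rw [List.countP_eq_zero] at h0
      rcases List.any_eq_true.mp h with ⟨w, hw, hpw⟩
      exact h0 w hw hpw
    · intro h
      rcases List.countP_pos_iff.mp (Nat.pos_of_ne_zero h) with ⟨w, hw, hpw⟩
      exact List.any_eq_true.mpr ⟨w, hw, hpw⟩
  split_ifs with h1 h2 h3 h4
  · have hn : n1 ≠ 0 := (hb _).mp h1
    apply pvMin?_nat_eq
    · simp [List.mem_append, List.mem_replicate, hn]
    · intro x _; exact Nat.zero_le x
  · have e1 : n1 = 0 := by by_contra h; exact h1 ((hb _).mpr h)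
    have hn : n2 ≠ 0 := (hb _).mp h2
    apply pvMin?_nat_eq
    · simp [List.mem_append, List.mem_replicate, e1, hn]
    · intro x hx
      simp [List.mem_append, List.mem_replicate, e1] at hx
      omega
  · have e1 : n1 = 0 := by by_contra h; exact h1 ((hb _).mpr h)
    have e2 : n2 = 0 := by by_contra h; exact h2 ((hb _).mpr h)
    have hn : n3 ≠ 0 := (hb _).mp h3
    apply pvMin?_nat_eq
    · simp [List.mem_append, List.mem_replicate, e1, e2, hn]
    · intro x hx
      simp [List.mem_append, List.mem_replicate, e1, e2] at hx
      omega
  · have e1 : n1 = 0 := by by_contra h; exact h1 ((hb _).mpr h)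
    have e2 : n2 = 0 := by by_contra h; exact h2 ((hb _).mpr h)
    have e3 : n3 = 0 := by by_contra h; exact h3 ((hb _).mpr h)
    have hn : n4 ≠ 0 := (hb _).mp h4
    apply pvMin?_nat_eq
    · simp [List.mem_replicate, e1, e2, e3, hn]
    · intro x hx
      simp [List.mem_replicate, e1, e2, e3] at hx
      omega
  · have e1 : n1 = 0 := by by_contra h; exact h1 ((hb _).mpr h)
    have e2 : n2 = 0 := by by_contra h; exact h2 ((hb _).mpr h)
    have e3 : n3 = 0 := by by_contra h; exact h3 ((hb _).mpr h)
    have e4 : n4 = 0 := by by_contra h; exact h4 ((hb _).mpr h)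
    rw [PySem.List.min?_eq_none_iff]
    simp [e1, e2, e3, e4]

-- ===== VERDICT =====
theorem get_cultural_response_spec : Claim_equal_get_cultural_response := by
  intro message detected_lang _
  unfold Spec_get_cultural_response
  simp only [get_cultural_response, get_cultural_response_alt]
  rw [pvMinHits (PySem.Str.lower message)]
  split_ifs <;> rfl
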